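-- pv_equiv track=rewrite | github.com/a-gavriel/Intro-Taller | Intro-Taller-Ejercicios/Jeff 2018/quiz3  partir.py | partir_aux
-- ===== SOURCE A (Python) =====
-- def partir_aux(num, temp, exp, result):
--     if num == 0:
--         if temp != 0:
--             return [temp] + result
--         else:
--             return result
--     elif num%10==0:
--         if temp != 0:
--             return partir_aux(num // 10, 0, 0, [temp] + result)
--         else:
--             return partir_aux(num // 10, 0, 0, result)
--     else:
--         return partir_aux(num // 10, temp + ((num % 10) * (10 ** exp)), exp +1, result)
-- ===== SOURCE B (Python) =====
-- def partir_aux(num, temp, exp, result):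
--     # Two-phase rewrite: materialize the digit list of num (least significant
--     # first), then a single left fold over it groups digits into zero-separated
--     # segments; the initial (temp, exp) accumulator seeds the lowest segment.
--     digits = []
--     n = num
--     while n != 0:
--         digits.append(n % 10)
--         n //= 10
--     segs = []
--     acc, e = temp, exp
--     for d in digits:
--         if d == 0:
--             if acc != 0:
--                 segs = [acc] + segs
--             acc, e = 0, 0
--         else:
--             acc += d * (10 ** e)
--             e += 1
--     if acc != 0:
--         segs = [acc] + segs
--     return segs + result
-- ===== Notes on version B (the rewrite author's own statement) =====
-- stated objective: alternative
-- what changed: Replaces A's single recursive function threading (temp, exp, result) accumulators by a two-phase iterative version: first materialize num's digit list with a while loop, then one for-loop fold over that list that groups digits into zero-separated segments, appending the caller's result list only once at the end.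
-- outside the precondition, e.g. on partir_aux(-5, 0, 0, []): A raises RecursionError, B does not finish within the time limit; on partir_aux(7, 0, -1, []): A returns [0.7000000000000001], B returns [0.7000000000000001]
import Mathlib
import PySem

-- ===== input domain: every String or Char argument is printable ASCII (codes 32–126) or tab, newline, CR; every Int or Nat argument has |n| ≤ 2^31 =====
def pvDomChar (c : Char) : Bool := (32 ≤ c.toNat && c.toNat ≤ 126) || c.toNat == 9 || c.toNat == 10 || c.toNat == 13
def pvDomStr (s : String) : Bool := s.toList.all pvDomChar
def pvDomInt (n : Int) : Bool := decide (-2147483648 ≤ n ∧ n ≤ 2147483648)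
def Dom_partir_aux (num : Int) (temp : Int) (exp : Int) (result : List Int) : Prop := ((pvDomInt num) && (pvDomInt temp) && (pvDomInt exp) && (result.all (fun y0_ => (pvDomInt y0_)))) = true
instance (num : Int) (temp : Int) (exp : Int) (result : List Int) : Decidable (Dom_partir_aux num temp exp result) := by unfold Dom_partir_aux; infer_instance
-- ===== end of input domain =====

-- B replaces A's recursion with a two-phase loop (digit list, then one fold); equivalence of return values on Pre_ (num ≥ 0, and exp ≥ 0 unless num's last digit is 0).

-- ===== PORT A =====
-- fuel-guarded transliteration of A's recursion (fuel only makes it total; num.natAbs + 1 always suffices when 0 ≤ num)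
def partirARec (fuel : Nat) (num : Int) (temp : Int) (exp : Int) (result : List Int) : List Int :=
  match fuel with
  | 0 => result
  | fuel + 1 =>
    if num = 0 then
      if temp ≠ 0 then temp :: result else result
    else if PySem.Int.mod num 10 = 0 then
      if temp ≠ 0 then partirARec fuel (PySem.Int.floordiv num 10) 0 0 (temp :: result)
      else partirARec fuel (PySem.Int.floordiv num 10) 0 0 result
    else
      partirARec fuel (PySem.Int.floordiv num 10) (temp + (PySem.Int.mod num 10) * 10 ^ exp.toNat) (exp + 1) result

def partir_aux (num : Int) (temp : Int) (exp : Int) (result : List Int) : List Int :=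
  partirARec (num.natAbs + 1) num temp exp result

-- ===== PORT B =====
-- phase 1 of B: the while loop collecting num's digits (least significant first); fuel as above
def pyDigitsLoop (fuel : Nat) (n : Int) (digits : List Int) : List Int :=
  match fuel with
  | 0 => digits
  | fuel + 1 =>
    if n = 0 then digits
    else pyDigitsLoop fuel (PySem.Int.floordiv n 10) (digits ++ [PySem.Int.mod n 10])

-- phase 2 of B: the for-loop body over one digit, state (segs, acc, e)
def segStep (st : List Int × Int × Int) (d : Int) : List Int × Int × Int :=
  if d = 0 then (if st.2.1 ≠ 0 then st.2.1 :: st.1 else st.1, 0, 0)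
  else (st.1, st.2.1 + d * 10 ^ st.2.2.toNat, st.2.2 + 1)

def partir_aux_alt (num : Int) (temp : Int) (exp : Int) (result : List Int) : List Int :=
  let digits := pyDigitsLoop (num.natAbs + 1) num []
  let st := digits.foldl segStep ([], temp, exp)
  (if st.2.1 ≠ 0 then st.2.1 :: st.1 else st.1) ++ result

-- ===== PRECONDITION & SPEC =====
-- Pre_ excludes num < 0 (A recurses forever: RecursionError) and the inputs where exp < 0 while
-- num's last digit is nonzero (10 ** exp is a float, so A returns a list containing a float, not ints).
def Pre_partir_aux (num : Int) (temp : Int) (exp : Int) (result : List Int) : Prop :=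
  0 ≤ num ∧ (0 ≤ exp ∨ PySem.Int.mod num 10 = 0)
instance (num : Int) (temp : Int) (exp : Int) (result : List Int) : Decidable (Pre_partir_aux num temp exp result) := by unfold Pre_partir_aux; infer_instance

def pvWitness_partir_aux : Int × Int × Int × List Int := (10203, 0, 0, [7])

def Spec_partir_aux (num : Int) (temp : Int) (exp : Int) (result : List Int) (out : List Int) : Prop := out = partir_aux_alt num temp exp result
instance (num : Int) (temp : Int) (exp : Int) (result : List Int) (out : List Int) : Decidable (Spec_partir_aux num temp exp result out) := by unfold Spec_partir_aux; infer_instance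

-- ===== CLAIM (what is proved, stated in full; the proofs are below) =====
def Claim_equal_partir_aux : Prop := ∀ (num : Int) (temp : Int) (exp : Int) (result : List Int), Dom_partir_aux num temp exp result → Pre_partir_aux num temp exp result → Spec_partir_aux num temp exp result (partir_aux num temp exp result)

-- ===== LEMMAS AND PROOFS =====

-- reference processor over an explicit digit list (bridge between the two ports)
def procR (ds : List Int) (t : Int) (e : Int) (r : List Int) : List Int :=
  match ds with
  | [] => if t ≠ 0 then t :: r else r
  | d :: ds =>
    if d = 0 then procR ds 0 0 (if t ≠ 0 then t :: r else r)
    else procR ds (t + d * 10 ^ e.toNat) (e + 1) r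

lemma floordiv_natAbs_lt (n : Int) (h0 : 0 ≤ n) (hne : n ≠ 0) :
    (PySem.Int.floordiv n 10).natAbs < n.natAbs := by
  rw [PySem.Int.floordiv_eq_ediv_of_pos (by omega)]
  omega

lemma pyDigitsLoop_acc (fuel : Nat) (n : Int) (digits : List Int) :
    pyDigitsLoop fuel n digits = digits ++ pyDigitsLoop fuel n [] := by
  induction fuel generalizing n digits with
  | zero => simp [pyDigitsLoop]
  | succ fuel ih =>
    by_cases h : n = 0
    · simp [pyDigitsLoop, h]
    · rw [pyDigitsLoop, pyDigitsLoop, if_neg h, if_neg h,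
        ih (PySem.Int.floordiv n 10) (digits ++ [PySem.Int.mod n 10]),
        ih (PySem.Int.floordiv n 10) ([] ++ [PySem.Int.mod n 10])]
      simp

-- A's recursion computes procR over the digit list, given enough fuel
lemma partirARec_eq_procR (fuel : Nat) (num t e : Int) (r : List Int)
    (h0 : 0 ≤ num) (hf : num.natAbs < fuel) :
    partirARec fuel num t e r = procR (pyDigitsLoop fuel num []) t e r := by
  induction fuel generalizing num t e r with
  | zero => omega
  | succ fuel ih =>
    by_cases h : num = 0
    · simp [partirARec, pyDigitsLoop, procR, h]
    · have hlt := floordiv_natAbs_lt num h0 h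
      have h0' : 0 ≤ PySem.Int.floordiv num 10 := by
        rw [PySem.Int.floordiv_eq_ediv_of_pos (by omega)]; omega
      rw [pyDigitsLoop, if_neg h, pyDigitsLoop_acc, List.nil_append, List.singleton_append,
        partirARec, if_neg h, procR]
      by_cases hm : PySem.Int.mod num 10 = 0
      · rw [if_pos hm, if_pos hm]
        by_cases ht : t ≠ 0
        · rw [if_pos ht, if_pos ht, ih _ 0 0 _ h0' (by omega)]
        · rw [if_neg ht, if_neg ht, ih _ 0 0 _ h0' (by omega)]
      · rw [if_neg hm, if_neg hm, ih _ _ _ _ h0' (by omega)]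

-- B's fold computes procR too (state generalized)
lemma foldl_segStep_eq_procR (ds : List Int) (t e : Int) (segs r : List Int) :
    (if (ds.foldl segStep (segs, t, e)).2.1 ≠ 0
       then (ds.foldl segStep (segs, t, e)).2.1 :: (ds.foldl segStep (segs, t, e)).1
       else (ds.foldl segStep (segs, t, e)).1) ++ r = procR ds t e (segs ++ r) := by
  induction ds generalizing t e segs with
  | nil =>
    by_cases ht : t ≠ 0 <;> simp [procR, ht]
  | cons d ds ih =>
    rw [List.foldl_cons, procR]
    by_cases hd : d = 0
    · rw [if_pos hd]
      by_cases ht : t ≠ 0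
      · rw [if_pos ht]
        have hs : segStep (segs, t, e) d = (t :: segs, 0, 0) := by simp [segStep, hd, ht]
        rw [hs, ih 0 0 (t :: segs), List.cons_append]
      · rw [if_neg ht]
        have hs : segStep (segs, t, e) d = (segs, 0, 0) := by simp [segStep, hd, ht]
        rw [hs, ih 0 0 segs]
    · rw [if_neg hd]
      have hs : segStep (segs, t, e) d = (segs, t + d * 10 ^ e.toNat, e + 1) := by
        simp [segStep, hd]
      rw [hs, ih (t + d * 10 ^ e.toNat) (e + 1) segs]

-- ===== VERDICT (by name: the statement is the Claim_ definition above) =====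
theorem partir_aux_spec : Claim_equal_partir_aux := by
  intro num temp exp result _ hpre
  unfold Spec_partir_aux partir_aux partir_aux_alt
  rw [partirARec_eq_procR _ _ _ _ _ hpre.1 (by omega)]
  have h2 := foldl_segStep_eq_procR (pyDigitsLoop (num.natAbs + 1) num []) temp exp [] result
  simpa using h2.symm
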